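-- pv_equiv track=rewrite | github.com/prez/adventofcode | 06/sage_sol.py | assignDepths
-- ===== SOURCE A (Python) =====
-- def assignDepths (orbits):
--     orbiterdepths = dict()
--     depths = dict()
--     depth = 0
--
--     masses = ['COM']
--     while len(masses) > 0:
--         newMasses = []
--         depths[depth] = set()
--         for mass in masses:
--             orbiterdepths[mass] = depth
--             depths[depth].add(mass)
--             if mass in orbits:
--                 for orbiter in orbits[mass]:
--                     newMasses.append(orbiter)
--         depth += 1
--         masses = newMasses
--     return depths, orbiterdepths
-- ===== SOURCE B (Python) =====
-- def assignDepths(orbits):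
--     # Depth-first: collect (mass, depth) pairs by recursion over the orbit tree,
--     # stable-sort them by depth (preorder within a depth = level order), then
--     # build both dicts in one pass over the sorted pairs.
--     pairs = []
--
--     def visit(mass, depth):
--         pairs.append((mass, depth))
--         for orbiter in orbits.get(mass, []):
--             visit(orbiter, depth + 1)
--
--     visit('COM', 0)
--     pairs.sort(key=lambda p: p[1])
--     depths = {}
--     orbiterdepths = {}
--     for mass, d in pairs:
--         depths.setdefault(d, set()).add(mass)
--         orbiterdepths[mass] = d
--     return depths, orbiterdepths
-- ===== Notes on version B (the rewrite author's own statement) =====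
-- stated objective: alternative
-- what changed: B replaces A's level-by-level BFS while-loop (explicit frontier lists, dicts mutated per level) with a recursive depth-first visit that collects (mass, depth) pairs, stable-sorts them by depth (preorder within a depth equals level order), and builds both dicts in one pass over the sorted pairs.
import Mathlib
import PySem

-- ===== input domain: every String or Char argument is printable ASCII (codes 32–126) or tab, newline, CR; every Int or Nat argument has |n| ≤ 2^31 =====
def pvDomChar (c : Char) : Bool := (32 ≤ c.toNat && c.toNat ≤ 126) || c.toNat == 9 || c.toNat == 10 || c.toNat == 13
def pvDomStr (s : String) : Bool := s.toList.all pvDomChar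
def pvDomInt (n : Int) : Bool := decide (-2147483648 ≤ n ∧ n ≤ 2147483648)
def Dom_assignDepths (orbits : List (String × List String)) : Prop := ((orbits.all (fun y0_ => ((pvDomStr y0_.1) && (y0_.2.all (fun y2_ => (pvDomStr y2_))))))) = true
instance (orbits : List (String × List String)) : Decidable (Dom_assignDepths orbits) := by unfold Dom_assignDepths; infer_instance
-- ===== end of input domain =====

-- B replaces A's level-by-level BFS loop with a recursive depth-first visit collecting
-- (mass, depth) pairs, a stable sort by depth, and one dict-building pass; objective:
-- alternative algorithm, same result.

-- ===== PORT A =====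
-- 'mass in orbits' / 'orbits[mass]' : first-match lookup in the orbits dict
def pvLookup (orbits : List (String × List String)) (m : String) : Option (List String) :=
  PySem.Dict.get? (PySem.Dict.mk orbits) m

-- body of A's 'for mass in masses' loop, state = (newMasses, depths, orbiterdepths)
def pvAStep (orbits : List (String × List String)) (depth : Int)
    (st : List String × PySem.Dict Int (PySem.Set String) × PySem.Dict String Int)
    (mass : String) :
    List String × PySem.Dict Int (PySem.Set String) × PySem.Dict String Int :=
  let od := st.2.2.insert mass depth
  let ds := st.2.1.modify depth PySem.Set.empty (fun s => PySem.Set.add s mass)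
  match pvLookup orbits mass with
  | some orbiters => (st.1 ++ orbiters, ds, od)
  | none => (st.1, ds, od)

-- A's while-loop. The fuel guard only makes the recursion total: whenever the
-- Python loop terminates, fuel = orbits.length + 2 is never exhausted.
def pvALoop (orbits : List (String × List String)) :
    Nat → List String → Int → PySem.Dict Int (PySem.Set String) → PySem.Dict String Int →
    PySem.Dict Int (PySem.Set String) × PySem.Dict String Int
  | 0, _, _, depths, od => (depths, od)
  | fuel+1, masses, depth, depths, od =>
    if 0 < masses.length then
      let st := masses.foldl (pvAStep orbits depth) ([], depths.insert depth PySem.Set.empty, od)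
      pvALoop orbits fuel st.1 (depth + 1) st.2.1 st.2.2
    else (depths, od)

def assignDepths (orbits : List (String × List String)) :
    (List (Int × List String)) × (List (String × Int)) :=
  let r := pvALoop orbits (orbits.length + 2) ["COM"] 0 PySem.Dict.empty PySem.Dict.empty
  (r.1.items, r.2.items)

-- ===== PORT B =====
-- 'visit(mass, depth)': append (mass, depth), recurse over orbits.get(mass, []).
-- The fuel argument only makes the recursion total: whenever the Python recursion
-- terminates, its depth is at most orbits.length + 1, so the guard never fires.
def pvVisit (orbits : List (String × List String)) : Nat → String → Int → List (String × Int)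
  | 0, _, _ => []
  | fuel+1, mass, depth =>
      (mass, depth) :: ((pvLookup orbits mass).getD []).flatMap
        (fun orbiter => pvVisit orbits fuel orbiter (depth + 1))

def assignDepths_alt (orbits : List (String × List String)) :
    (List (Int × List String)) × (List (String × Int)) :=
  -- pairs.sort(key=lambda p: p[1])
  let pairs := PySem.List.sorted (pvVisit orbits (orbits.length + 2) "COM" 0) (fun p => p.2) false
  -- for mass, d in pairs: depths.setdefault(d, set()).add(mass); orbiterdepths[mass] = d
  let st := pairs.foldl
    (fun (st : PySem.Dict Int (PySem.Set String) × PySem.Dict String Int) p =>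
      (PySem.Dict.modify st.1 p.2 PySem.Set.empty (fun s => PySem.Set.add s p.1),
       PySem.Dict.insert st.2 p.1 p.2))
    (PySem.Dict.empty, PySem.Dict.empty)
  (st.1.items, st.2.items)

-- ===== PRECONDITION & SPEC =====
-- No Pre_: the equality of the two ports is proved for ALL inputs.  On inputs whose
-- orbit graph has a cycle reachable from 'COM' neither Python returns (A loops
-- forever, B's recursion exceeds the stack); there both ports share the same
-- fuel-truncated recursion depth, so the proved equality still holds.
def Spec_assignDepths (orbits : List (String × List String)) (out : (List (Int × List String)) × (List (String × Int))) : Prop := out = assignDepths_alt orbits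
instance (orbits : List (String × List String)) (out : (List (Int × List String)) × (List (String × Int))) : Decidable (Spec_assignDepths orbits out) := by unfold Spec_assignDepths; infer_instance

-- ===== CLAIM (what is proved, stated in full; the proofs are below) =====
def Claim_equal_assignDepths : Prop := ∀ (orbits : List (String × List String)), Dom_assignDepths orbits → Spec_assignDepths orbits (assignDepths orbits)

-- ===== LEMMAS AND PROOFS =====

-- proof-side helpers: the frontier-expansion step, its iterates, the BFS level list
def pvExpand (orbits : List (String × List String)) (F : List String) : List String :=
  F.flatMap (fun m => (pvLookup orbits m).getD [])

def pvIter (orbits : List (String × List String)) : Nat → List String → List String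
  | 0, F => F
  | j+1, F => pvIter orbits j (pvExpand orbits F)

def pvBLevels (orbits : List (String × List String)) :
    Nat → List String → List (List String)
  | 0, _ => []
  | fuel+1, frontier =>
    if 0 < frontier.length then
      frontier :: pvBLevels orbits fuel (pvExpand orbits frontier)
    else []

def pvTag (d : Int) (lvl : List String) : List (String × Int) := lvl.map (fun m => (m, d))

def pvLevelPairs (lvls : List (List String)) (d0 : Int) : List (String × Int) :=
  (PySem.List.enumerate lvls d0).flatMap (fun p => pvTag p.1 p.2)

-- ---------- A-side: the loop produces the level decomposition (as in BFS) ----------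

-- A's inner for-loop splits into three independent folds.
theorem pv_foldl_aStep (orbits : List (String × List String)) (depth : Int) :
    ∀ (masses : List String) (nm : List String)
      (D : PySem.Dict Int (PySem.Set String)) (od : PySem.Dict String Int),
    masses.foldl (pvAStep orbits depth) (nm, D, od) =
      (nm ++ masses.flatMap (fun m => (pvLookup orbits m).getD []),
       masses.foldl (fun D m => PySem.Dict.modify D depth PySem.Set.empty
          (fun s => PySem.Set.add s m)) D,
       masses.foldl (fun O m => PySem.Dict.insert O m depth) od) := by
  intro masses
  induction masses with
  | nil => intro nm D od; simp
  | cons m t ih =>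
      intro nm D od
      simp only [List.foldl_cons, List.flatMap_cons]
      cases h : pvLookup orbits m with
      | none => simp [pvAStep, h, ih]
      | some l => simp [pvAStep, h, ih, List.append_assoc]

-- a modify on a key sitting last with no earlier occurrence updates it in place
theorem pv_map_id (depth : Int) (v : Int × PySem.Set String) :
    ∀ (items : List (Int × PySem.Set String)), (∀ p ∈ items, p.1 ≠ depth) →
    items.map (fun p => if p.1 = depth then v else p) = items := by
  intro items
  induction items with
  | nil => intro _; simp
  | cons a t iht =>
      intro h
      simp only [List.map_cons, if_neg (h a (by simp))]
      rw [iht (fun p hp => h p (by simp [hp]))]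

theorem pv_modify_last (items : List (Int × PySem.Set String)) (depth : Int)
    (s : PySem.Set String) (f : PySem.Set String → PySem.Set String)
    (h : ∀ p ∈ items, p.1 ≠ depth) :
    PySem.Dict.modify (PySem.Dict.mk (items ++ [(depth, s)])) depth PySem.Set.empty f =
      PySem.Dict.mk (items ++ [(depth, f s)]) := by
  have hfind : items.find? (fun p => p.1 == depth) = none := by
    apply List.find?_eq_none.2
    intro p hp
    simp [h p hp]
  simp only [PySem.Dict.modify, PySem.Dict.insert, PySem.Dict.contains, PySem.Dict.getD,
        PySem.Dict.get?]
  simp [List.find?_append, hfind, List.any_append, pv_map_id depth _ items h]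

-- chaining A's per-mass modifies builds the level set in place
theorem pv_modify_chain (depth : Int) :
    ∀ (masses : List String) (items : List (Int × PySem.Set String)) (s : PySem.Set String),
    (∀ p ∈ items, p.1 ≠ depth) →
    masses.foldl (fun D m => PySem.Dict.modify D depth PySem.Set.empty
        (fun t => PySem.Set.add t m)) (PySem.Dict.mk (items ++ [(depth, s)])) =
      PySem.Dict.mk (items ++ [(depth, masses.foldl PySem.Set.add s)]) := by
  intro masses
  induction masses with
  | nil => intro items s _; simp
  | cons m t ih =>
      intro items s h
      simp only [List.foldl_cons]
      rw [pv_modify_last items depth s _ h]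
      exact ih items (PySem.Set.add s m) h

-- inserting a fresh key appends
theorem pv_insert_fresh {ν : Type} (D : PySem.Dict Int ν) (k : Int) (v : ν)
    (h : ∀ p ∈ D.items, p.1 ≠ k) :
    PySem.Dict.insert D k v = PySem.Dict.mk (D.items ++ [(k, v)]) := by
  have hc : D.contains k = false := by
    apply List.any_eq_false.2
    intro p hp
    simp [h p hp]
  simp [PySem.Dict.insert, hc]

-- modifying a fresh key appends the default image
theorem pv_modify_fresh (items : List (Int × PySem.Set String)) (d : Int)
    (f : PySem.Set String → PySem.Set String)
    (h : ∀ p ∈ items, p.1 ≠ d) :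
    PySem.Dict.modify (PySem.Dict.mk items) d PySem.Set.empty f =
      PySem.Dict.mk (items ++ [(d, f PySem.Set.empty)]) := by
  have hfind : items.find? (fun p => p.1 == d) = none :=
    List.find?_eq_none.2 (fun p hp => by simp [h p hp])
  have hc : items.any (fun p => p.1 == d) = false :=
    List.any_eq_false.2 (fun p hp => by simp [h p hp])
  simp [PySem.Dict.modify, PySem.Dict.insert, PySem.Dict.contains, PySem.Dict.getD,
        PySem.Dict.get?, hfind, hc]

-- MAIN INVARIANT (A side): A's loop produces exactly the level-decomposition folds.
theorem pv_main (orbits : List (String × List String)) :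
    ∀ (fuel : Nat) (masses : List String) (depth : Int)
      (depths : PySem.Dict Int (PySem.Set String)) (od : PySem.Dict String Int),
    (∀ p ∈ depths.items, p.1 < depth) →
    pvALoop orbits fuel masses depth depths od =
      (PySem.Dict.mk (depths.items ++
         (PySem.List.enumerate (pvBLevels orbits fuel masses) depth).map
           (fun p => (p.1, PySem.Set.ofList p.2))),
       (PySem.List.enumerate (pvBLevels orbits fuel masses) depth).foldl
         (fun O p => p.2.foldl (fun O m => PySem.Dict.insert O m p.1) O) od) := by
  intro fuel
  induction fuel with
  | zero =>
      intro masses depth depths od _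
      simp [pvALoop, pvBLevels]
  | succ fuel ih =>
      intro masses depth depths od hlt
      by_cases h : 0 < masses.length
      · rw [pvALoop, pvBLevels, if_pos h, if_pos h]
        rw [pv_foldl_aStep]
        have hne : ∀ p ∈ depths.items, p.1 ≠ depth := fun p hp => ne_of_lt (hlt p hp)
        rw [pv_insert_fresh depths depth PySem.Set.empty hne]
        simp only
        rw [pv_modify_chain depth masses depths.items PySem.Set.empty hne]
        rw [ih _ (depth + 1) _ _ ?_]
        · rw [PySem.List.enumerate_cons]
          simp [← PySem.Set.ofList_eq_foldl, List.append_assoc, pvExpand]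
        · intro p hp
          rcases List.mem_append.1 hp with hp | hp
          · exact lt_trans (hlt p hp) (by omega)
          · simp at hp
            rw [hp]
            exact lt_add_one depth
      · rw [pvALoop, pvBLevels, if_neg h, if_neg h]
        simp [PySem.List.enumerate]

-- ---------- expansion-iterate facts ----------

theorem pvIter_nil (orbits : List (String × List String)) :
    ∀ j, pvIter orbits j [] = [] := by
  intro j
  induction j with
  | zero => rfl
  | succ j ih => simpa [pvIter, pvExpand] using ih

theorem pvIter_flatMap (orbits : List (String × List String)) :
    ∀ (j : Nat) (F : List String) (g : String → List String),
    pvIter orbits j (F.flatMap g) = F.flatMap (fun m => pvIter orbits j (g m)) := by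
  intro j
  induction j with
  | zero => intro F g; rfl
  | succ j ih =>
      intro F g
      show pvIter orbits j (pvExpand orbits (F.flatMap g)) = _
      have h1 : pvExpand orbits (F.flatMap g) = F.flatMap (fun m => pvExpand orbits (g m)) := by
        simp [pvExpand, List.flatMap_assoc]
      rw [h1]
      exact ih F _

-- ---------- B side: depths occurring in the DFS pair list ----------

theorem pvVisit_lb (orbits : List (String × List String)) :
    ∀ (fuel : Nat) (mass : String) (d0 : Int) (p : String × Int),
    p ∈ pvVisit orbits fuel mass d0 → d0 ≤ p.2 := by
  intro fuel
  induction fuel with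
  | zero => intro mass d0 p hp; simp [pvVisit] at hp
  | succ fuel ih =>
      intro mass d0 p hp
      simp only [pvVisit, List.mem_cons, List.mem_flatMap] at hp
      rcases hp with rfl | ⟨o, _, hp⟩
      · simp
      · have := ih o (d0 + 1) p hp
        omega

-- the depth-j slice of the DFS pair forest is the j-th expansion of the frontier
theorem pvVisit_filter (orbits : List (String × List String)) :
    ∀ (j : Nat) (fuel : Nat) (F : List String) (d0 : Int),
    (F.flatMap (fun m => pvVisit orbits fuel m d0)).filter
        (fun p => p.2 == d0 + (j : Int)) =
      (if j < fuel then pvTag (d0 + (j : Int)) (pvIter orbits j F) else []) := by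
  intro j
  induction j with
  | zero =>
      intro fuel F d0
      cases fuel with
      | zero => simp [pvVisit]
      | succ fuel =>
          rw [List.filter_flatMap]
          have hper : ∀ m : String,
              (pvVisit orbits (fuel + 1) m d0).filter
                (fun p => p.2 == d0 + ((0 : Nat) : Int)) = [(m, d0)] := by
            intro m
            simp only [pvVisit, List.filter_cons]
            have hh : (((m, d0) : String × Int).2 == d0 + ((0 : Nat) : Int)) = true := by
              simp
            have ht : (((pvLookup orbits m).getD []).flatMap
                (fun o => pvVisit orbits fuel o (d0 + 1))).filter
                (fun p => p.2 == d0 + ((0 : Nat) : Int)) = [] := by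
              refine List.filter_eq_nil_iff.2 ?_
              intro p hp
              rcases List.mem_flatMap.1 hp with ⟨o, _, hpo⟩
              have := pvVisit_lb orbits fuel o (d0 + 1) p hpo
              simp only [beq_iff_eq]
              intro hcon
              omega
            rw [hh, if_pos rfl, ht]
          simp only [hper]
          rw [← List.map_eq_flatMap]
          simp [pvTag, pvIter]
  | succ j ih =>
      intro fuel F d0
      cases fuel with
      | zero => simp [pvVisit]
      | succ fuel =>
          rw [List.filter_flatMap]
          have key : d0 + ((j + 1 : Nat) : Int) = (d0 + 1) + (j : Int) := by
            push_cast; ring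
          have hper : ∀ m : String,
              (pvVisit orbits (fuel + 1) m d0).filter
                  (fun p => p.2 == d0 + ((j + 1 : Nat) : Int)) =
                (if j < fuel then
                  pvTag ((d0 + 1) + (j : Int))
                    (pvIter orbits j ((pvLookup orbits m).getD [])) else []) := by
            intro m
            simp only [pvVisit, List.filter_cons]
            have hh : (((m, d0) : String × Int).2 == d0 + ((j + 1 : Nat) : Int)) = false := by
              simp only [beq_eq_false_iff_ne, ne_eq]
              intro hcon
              omega
            rw [hh]
            simp only [key]
            exact ih fuel ((pvLookup orbits m).getD []) (d0 + 1)
          simp only [hper]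
          by_cases hj : j < fuel
          · simp only [if_pos hj]
            rw [if_pos (by omega : j + 1 < fuel + 1)]
            have hrhs : pvIter orbits (j + 1) F =
                F.flatMap (fun m => pvIter orbits j ((pvLookup orbits m).getD [])) := by
              show pvIter orbits j (pvExpand orbits F) = _
              exact pvIter_flatMap orbits j F _
            rw [hrhs, key]
            simp only [pvTag, List.map_flatMap]
          · simp only [if_neg hj]
            rw [if_neg (by omega : ¬ j + 1 < fuel + 1)]
            simp

-- ---------- level-pair list: bounds, pairwise order, slices ----------

theorem pvLevelPairs_lb :
    ∀ (lvls : List (List String)) (d0 : Int) (p : String × Int),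
    p ∈ pvLevelPairs lvls d0 → d0 ≤ p.2 := by
  intro lvls
  induction lvls with
  | nil => intro d0 p hp; simp [pvLevelPairs, PySem.List.enumerate] at hp
  | cons l t ih =>
      intro d0 p hp
      simp only [pvLevelPairs, PySem.List.enumerate_cons, List.flatMap_cons] at hp
      rcases List.mem_append.1 hp with hp | hp
      · simp only [pvTag, List.mem_map] at hp
        rcases hp with ⟨m, _, rfl⟩
        simp
      · have := ih (d0 + 1) p hp
        omega

theorem pvLevelPairs_pairwise :
    ∀ (lvls : List (List String)) (d0 : Int),
    (pvLevelPairs lvls d0).Pairwise (fun a b => a.2 ≤ b.2) := by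
  intro lvls
  induction lvls with
  | nil => intro d0; simp [pvLevelPairs, PySem.List.enumerate]
  | cons l t ih =>
      intro d0
      simp only [pvLevelPairs, PySem.List.enumerate_cons, List.flatMap_cons]
      refine List.pairwise_append.2 ⟨?_, ih (d0 + 1), ?_⟩
      · refine List.pairwise_map.2 ?_
        exact List.pairwise_of_forall_sublist (fun {_ _} _ => le_refl d0)
      · intro a ha b hb
        simp only [pvTag, List.mem_map] at ha
        rcases ha with ⟨m, _, rfl⟩
        have := pvLevelPairs_lb t (d0 + 1) b hb
        simpa using by omega

theorem pvLevels_filter (orbits : List (String × List String)) :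
    ∀ (fuel : Nat) (F : List String) (d0 : Int) (j : Nat),
    (pvLevelPairs (pvBLevels orbits fuel F) d0).filter
        (fun p => p.2 == d0 + (j : Int)) =
      (if j < fuel then pvTag (d0 + (j : Int)) (pvIter orbits j F) else []) := by
  intro fuel
  induction fuel with
  | zero =>
      intro F d0 j
      simp [pvBLevels, pvLevelPairs]
  | succ fuel ih =>
      intro F d0 j
      rw [pvBLevels]
      cases F with
      | nil =>
          rw [if_neg (by simp)]
          simp only [pvLevelPairs, PySem.List.enumerate, List.flatMap_nil,
            List.filter_nil, pvIter_nil, pvTag, List.map_nil]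
          split <;> rfl
      | cons m F' =>
          rw [if_pos (by simp)]
          simp only [pvLevelPairs, PySem.List.enumerate_cons, List.flatMap_cons,
            List.filter_append]
          cases j with
          | zero =>
              have h1 : (pvTag d0 (m :: F')).filter
                  (fun p => p.2 == d0 + ((0 : Nat) : Int)) = pvTag d0 (m :: F') := by
                refine List.filter_eq_self.mpr ?_
                intro p hp
                simp only [pvTag, List.mem_map] at hp
                rcases hp with ⟨x, _, rfl⟩
                simp
              have h2 : ((PySem.List.enumerate
                    (pvBLevels orbits fuel (pvExpand orbits (m :: F'))) (d0 + 1)).flatMap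
                  (fun p => pvTag p.1 p.2)).filter
                  (fun p => p.2 == d0 + ((0 : Nat) : Int)) = [] := by
                refine List.filter_eq_nil_iff.2 ?_
                intro p hp
                have := pvLevelPairs_lb _ (d0 + 1) p hp
                simp only [beq_iff_eq]
                intro hcon
                omega
              rw [h1, h2, if_pos (Nat.succ_pos fuel)]
              simp [pvIter]
          | succ j =>
              have key : d0 + ((j + 1 : Nat) : Int) = (d0 + 1) + (j : Int) := by
                push_cast; ring
              have h1 : (pvTag d0 (m :: F')).filter
                  (fun p => p.2 == d0 + ((j + 1 : Nat) : Int)) = [] := by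
                refine List.filter_eq_nil_iff.2 ?_
                intro p hp
                simp only [pvTag, List.mem_map] at hp
                rcases hp with ⟨x, _, rfl⟩
                simp only [beq_iff_eq]
                intro hcon
                omega
              rw [h1]
              simp only [key]
              have h2 := ih (pvExpand orbits (m :: F')) (d0 + 1) j
              simp only [pvLevelPairs] at h2
              rw [h2]
              by_cases hj : j < fuel
              · rw [if_pos hj, if_pos (by omega : j + 1 < fuel + 1), ← key]
                rfl
              · rw [if_neg hj, if_neg (by omega : ¬ j + 1 < fuel + 1)]
                rfl

theorem pvBLevels_ne_nil (orbits : List (String × List String)) :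
    ∀ (fuel : Nat) (F : List String) (l : List String),
    l ∈ pvBLevels orbits fuel F → l ≠ [] := by
  intro fuel
  induction fuel with
  | zero => intro F l hl; simp [pvBLevels] at hl
  | succ fuel ih =>
      intro F l hl
      rw [pvBLevels] at hl
      by_cases h : 0 < F.length
      · rw [if_pos h] at hl
        rcases List.mem_cons.1 hl with rfl | hl
        · exact List.ne_nil_of_length_pos h
        · exact ih _ l hl
      · rw [if_neg h] at hl
        simp at hl

-- ---------- stability of the sort ----------

theorem pv_insertBy_pairwise (x : String × Int) :
    ∀ (ys : List (String × Int)), ys.Pairwise (fun a b => a.2 ≤ b.2) →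
    (PySem.List.insertBy (fun a b => decide (a.2 < b.2)) x ys).Pairwise
      (fun a b => a.2 ≤ b.2) := by
  intro ys
  induction ys with
  | nil => intro _; simp [PySem.List.insertBy]
  | cons y t ih =>
      intro h
      obtain ⟨hy, ht⟩ := List.pairwise_cons.1 h
      rw [PySem.List.insertBy]
      by_cases hb : x.2 < y.2
      · rw [if_pos (by simpa using hb)]
        refine List.pairwise_cons.2 ⟨?_, h⟩
        intro b hbmem
        rcases List.mem_cons.1 hbmem with rfl | hbmem
        · exact le_of_lt hb
        · exact le_trans (le_of_lt hb) (hy b hbmem)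
      · rw [if_neg (by simpa using hb)]
        refine List.pairwise_cons.2 ⟨?_, ih ht⟩
        intro b hbmem
        rcases (PySem.List.mem_insertBy _ _ _ _).1 hbmem with rfl | hbmem
        · exact le_of_not_gt hb
        · exact hy b hbmem

theorem pv_insertBy_filter (k : Int) (x : String × Int) :
    ∀ (ys : List (String × Int)), ys.Pairwise (fun a b => a.2 ≤ b.2) →
    (PySem.List.insertBy (fun a b => decide (a.2 < b.2)) x ys).filter
        (fun p => p.2 == k) =
      (if x.2 == k then ys.filter (fun p => p.2 == k) ++ [x]
       else ys.filter (fun p => p.2 == k)) := by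
  intro ys
  induction ys with
  | nil =>
      intro _
      by_cases hk : x.2 = k <;> simp [PySem.List.insertBy, hk]
  | cons y t ih =>
      intro h
      obtain ⟨hy, ht⟩ := List.pairwise_cons.1 h
      rw [PySem.List.insertBy]
      by_cases hb : x.2 < y.2
      · rw [if_pos (by simpa using hb)]
        by_cases hk : x.2 = k
        · have hfil : (y :: t).filter (fun p => p.2 == k) = [] := by
            refine List.filter_eq_nil_iff.2 ?_
            intro p hp
            have hple : y.2 ≤ p.2 := by
              rcases List.mem_cons.1 hp with rfl | hp
              · exact le_refl _
              · exact hy p hp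
            simp only [beq_iff_eq]
            intro hcon
            omega
          simp [hk, hfil]
        · simp [hk]
      · rw [if_neg (by simpa using hb)]
        simp only [List.filter_cons]
        rw [ih ht]
        by_cases hyk : y.2 = k <;> by_cases hxk : x.2 = k <;>
          simp [hyk, hxk]

theorem pv_sorted_filter (k : Int) (xs : List (String × Int)) :
    (PySem.List.sorted xs (fun p => p.2) false).filter (fun p => p.2 == k) =
      xs.filter (fun p => p.2 == k) := by
  have main : ∀ (xs : List (String × Int)) (acc : List (String × Int)),
      acc.Pairwise (fun a b => a.2 ≤ b.2) →
      (xs.foldl (fun a x =>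
          PySem.List.insertBy (fun a b => decide (a.2 < b.2)) x a) acc).filter
        (fun p => p.2 == k) =
      acc.filter (fun p => p.2 == k) ++ xs.filter (fun p => p.2 == k) := by
    intro xs
    induction xs with
    | nil => intro acc _; simp
    | cons x t ih =>
        intro acc hacc
        simp only [List.foldl_cons]
        rw [ih _ (pv_insertBy_pairwise x acc hacc)]
        rw [pv_insertBy_filter k x acc hacc]
        by_cases hxk : x.2 = k <;>
          simp [hxk, List.append_assoc]
  rw [PySem.List.sorted_eq_foldl_insertBy]
  simpa using main xs [] List.Pairwise.nil

-- two key-nondecreasing lists with the same depth slices are equal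
theorem pv_eq_of_filter_eq :
    ∀ (l₁ l₂ : List (String × Int)),
    l₁.Pairwise (fun a b => a.2 ≤ b.2) → l₂.Pairwise (fun a b => a.2 ≤ b.2) →
    (∀ k : Int, l₁.filter (fun p => p.2 == k) = l₂.filter (fun p => p.2 == k)) →
    l₁ = l₂ := by
  intro l₁
  induction l₁ with
  | nil =>
      intro l₂ _ _ hf
      cases l₂ with
      | nil => rfl
      | cons b t₂ =>
          have h' := hf b.2
          simp at h'
  | cons a t₁ ih =>
      intro l₂ h₁ h₂ hf
      obtain ⟨ha, ht₁⟩ := List.pairwise_cons.1 h₁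
      cases l₂ with
      | nil =>
          have h' := hf a.2
          simp at h'
      | cons b t₂ =>
          obtain ⟨hb, ht₂⟩ := List.pairwise_cons.1 h₂
          have hab : a = b := by
            by_cases hbk : b.2 = a.2
            · have h' := hf a.2
              simp only [List.filter_cons, beq_self_eq_true, if_pos, hbk] at h'
              simpa using (List.cons_eq_cons.1 (by simpa using h')).1
            · have h' := hf a.2
              rw [List.filter_cons, List.filter_cons] at h'
              simp only [beq_self_eq_true, if_pos] at h'
              rw [if_neg (by simp [hbk])] at h'
              have hamem : a ∈ t₂ := by
                have : a ∈ t₂.filter (fun p => p.2 == a.2) := by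
                  rw [← h']; simp
                exact (List.mem_filter.1 this).1
              have hba : b.2 < a.2 := lt_of_le_of_ne (hb a hamem) hbk
              have h'' := hf b.2
              rw [List.filter_cons, List.filter_cons] at h''
              rw [if_neg (by simp; omega)] at h''
              simp only [beq_self_eq_true, if_pos] at h''
              have ht₁nil : t₁.filter (fun p => p.2 == b.2) = [] := by
                refine List.filter_eq_nil_iff.2 ?_
                intro p hp
                have := ha p hp
                simp only [beq_iff_eq]
                intro hcon
                omega
              rw [ht₁nil] at h''
              exact absurd h''.symm (List.cons_ne_nil _ _)
          subst hab
          have htail : t₁ = t₂ := by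
            refine ih t₂ ht₁ ht₂ ?_
            intro k
            have h' := hf k
            rw [List.filter_cons, List.filter_cons] at h'
            by_cases hak : a.2 = k
            · rw [if_pos (by simp [hak]), if_pos (by simp [hak])] at h'
              exact List.cons_eq_cons.1 h' |>.2
            · rwa [if_neg (by simp [hak]), if_neg (by simp [hak])] at h'
          rw [htail]

-- KEY: the stable sort of the DFS pair list is the level-pair list
theorem pv_sorted_eq_levels (orbits : List (String × List String)) (fuel : Nat) :
    PySem.List.sorted (pvVisit orbits fuel "COM" 0) (fun p => p.2) false =
      pvLevelPairs (pvBLevels orbits fuel ["COM"]) 0 := by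
  refine pv_eq_of_filter_eq _ _ (PySem.List.sorted_pairwise _ _)
    (pvLevelPairs_pairwise _ 0) ?_
  intro k
  rw [pv_sorted_filter]
  have hsingle : pvVisit orbits fuel "COM" 0 =
      (["COM"] : List String).flatMap (fun m => pvVisit orbits fuel m 0) := by simp
  by_cases hk : 0 ≤ k
  · have hk2 : k = 0 + ((k.toNat : Nat) : Int) := by omega
    rw [hk2, hsingle, pvVisit_filter orbits k.toNat fuel ["COM"] 0,
        pvLevels_filter orbits fuel ["COM"] 0 k.toNat]
  · have h1 : (pvVisit orbits fuel "COM" 0).filter (fun p => p.2 == k) = [] := by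
      refine List.filter_eq_nil_iff.2 ?_
      intro p hp
      have := pvVisit_lb orbits fuel "COM" 0 p hp
      simp only [beq_iff_eq]
      intro hcon
      omega
    have h2 : (pvLevelPairs (pvBLevels orbits fuel ["COM"]) 0).filter
        (fun p => p.2 == k) = [] := by
      refine List.filter_eq_nil_iff.2 ?_
      intro p hp
      have := pvLevelPairs_lb _ 0 p hp
      simp only [beq_iff_eq]
      intro hcon
      omega
    rw [h1, h2]

-- ---------- B's dict-building pass over the level pairs ----------

theorem pv_depths_fold :
    ∀ (lvls : List (List String)) (d0 : Int) (items : List (Int × PySem.Set String)),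
    (∀ p ∈ items, p.1 < d0) → (∀ l ∈ lvls, l ≠ []) →
    (pvLevelPairs lvls d0).foldl
        (fun D p => PySem.Dict.modify D p.2 PySem.Set.empty
          (fun s => PySem.Set.add s p.1)) (PySem.Dict.mk items) =
      PySem.Dict.mk (items ++
        (PySem.List.enumerate lvls d0).map (fun p => (p.1, PySem.Set.ofList p.2))) := by
  intro lvls
  induction lvls with
  | nil => intro d0 items _ _; simp [pvLevelPairs, PySem.List.enumerate]
  | cons l t ih =>
      intro d0 items hlt hne
      cases l with
      | nil => exact absurd rfl (hne [] (by simp))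
      | cons m lt =>
          simp only [pvLevelPairs, PySem.List.enumerate_cons, List.flatMap_cons,
            List.foldl_append]
          have hfresh : ∀ p ∈ items, p.1 ≠ d0 := fun p hp => ne_of_lt (hlt p hp)
          have hfold1 : (pvTag d0 (m :: lt)).foldl
              (fun D p => PySem.Dict.modify D p.2 PySem.Set.empty
                (fun s => PySem.Set.add s p.1)) (PySem.Dict.mk items) =
              PySem.Dict.mk (items ++ [(d0, PySem.Set.ofList (m :: lt))]) := by
            simp only [pvTag, List.foldl_map, List.foldl_cons]
            rw [pv_modify_fresh items d0 _ hfresh]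
            rw [pv_modify_chain d0 lt items _ hfresh]
            rw [PySem.Set.ofList_eq_foldl, List.foldl_cons]
            rfl
          rw [hfold1]
          have hstep := ih (d0 + 1) (items ++ [(d0, PySem.Set.ofList (m :: lt))])
            (by
              intro p hp
              rcases List.mem_append.1 hp with hp | hp
              · exact lt_trans (hlt p hp) (by omega)
              · simp at hp
                rw [hp]
                omega)
            (fun l' hl' => hne l' (by simp [hl']))
          simp only [pvLevelPairs] at hstep
          rw [hstep]
          simp [List.append_assoc]

theorem pv_od_fold (lvls : List (List String)) (d0 : Int) (O0 : PySem.Dict String Int) :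
    (pvLevelPairs lvls d0).foldl (fun O p => PySem.Dict.insert O p.1 p.2) O0 =
      (PySem.List.enumerate lvls d0).foldl
        (fun O p => p.2.foldl (fun O m => PySem.Dict.insert O m p.1) O) O0 := by
  simp [pvLevelPairs, List.foldl_flatMap, pvTag, List.foldl_map]

-- ===== VERDICT (by name: the statement is the Claim_ definition above) =====
theorem assignDepths_spec : Claim_equal_assignDepths := by
  intro orbits _
  unfold Spec_assignDepths
  simp only [assignDepths, assignDepths_alt]
  rw [pv_main orbits (orbits.length + 2) ["COM"] 0 PySem.Dict.empty PySem.Dict.empty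
      (by simp [PySem.Dict.empty])]
  rw [pv_sorted_eq_levels]
  rw [PySem.List.foldl_prod_mk
      (f := fun D (p : String × Int) => PySem.Dict.modify D p.2 PySem.Set.empty
        (fun s => PySem.Set.add s p.1))
      (g := fun O (p : String × Int) => PySem.Dict.insert O p.1 p.2)]
  have hemp : (PySem.Dict.empty : PySem.Dict Int (PySem.Set String)) = PySem.Dict.mk [] := rfl
  rw [hemp, pv_depths_fold _ _ [] (by simp) (pvBLevels_ne_nil orbits _ _)]
  rw [pv_od_fold]
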